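-- pv_equiv track=rewrite | github.com/jku-vds-lab/paradime | paradime/utils/repr.py | _addindent
-- ===== SOURCE A (Python) =====
-- def _addindent(s: str, num_spaces: int) -> str:
--     lines = s.split("\n")
--     # don't do anything for single-line stuff
--     if len(lines) == 1:
--         return s
--     first = lines.pop(0)
--     lines = [(num_spaces * " ") + line for line in lines]
--     s = "\n".join(lines)
--     s = first + "\n" + s
--     return s
-- ===== SOURCE B (Python) =====
-- def _addindent(s: str, num_spaces: int) -> str:
--     if "\n" not in s:
--         return s
--     return s.replace("\n", "\n" + num_spaces * " ")
-- ===== Notes on version B (the rewrite author's own statement) =====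
-- stated objective: idiomatic
-- what changed: Replaces the split/pop/per-line-indent/join pipeline with a single s.replace("\n", "\n" + num_spaces * " ") behind a '"\n" in s' guard that skips single-line strings without building the pad.
import Mathlib
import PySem

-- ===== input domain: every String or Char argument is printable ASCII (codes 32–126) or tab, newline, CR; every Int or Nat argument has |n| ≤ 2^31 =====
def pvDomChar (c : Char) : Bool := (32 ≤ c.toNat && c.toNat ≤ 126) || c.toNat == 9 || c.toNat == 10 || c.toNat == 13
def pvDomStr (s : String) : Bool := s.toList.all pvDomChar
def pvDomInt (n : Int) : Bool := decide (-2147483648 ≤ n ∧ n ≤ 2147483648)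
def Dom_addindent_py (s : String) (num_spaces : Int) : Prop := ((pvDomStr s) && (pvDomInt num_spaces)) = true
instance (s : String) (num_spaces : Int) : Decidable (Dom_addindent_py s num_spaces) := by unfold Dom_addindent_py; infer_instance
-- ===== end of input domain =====

-- B replaces A's split/pop/indent/join pipeline with one substitution (behind a newline-membership guard): s.replace("\\n", "\\n" + num_spaces * " ").

-- num_spaces * " "  (Python string repetition; a non-positive count gives the empty string)
def pySpaces (n : Int) : List Char := List.replicate n.toNat ' '

-- ===== PORT A =====
def addindent_py (s : String) (num_spaces : Int) : String :=
  let lines := PySem.Chars.splitOn s.toList ['\n']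
  if lines.length == 1 then s
  else
    match PySem.List.pop? lines 0 with
    | none => s  -- unreachable: split never returns an empty list
    | some (first, rest) =>
      let rest := rest.map (fun line => pySpaces num_spaces ++ line)
      let j := PySem.Chars.join ['\n'] rest
      String.ofList (first ++ '\n' :: j)

-- ===== PORT B =====
def addindent_py_alt (s : String) (num_spaces : Int) : String :=
  if PySem.Chars.isIn ['\n'] s.toList then
    String.ofList (PySem.Chars.replace s.toList ['\n'] ('\n' :: pySpaces num_spaces))
  else s

-- ===== PRECONDITION & SPEC =====
def Spec_addindent_py (s : String) (num_spaces : Int) (out : String) : Prop := out = addindent_py_alt s num_spaces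
instance (s : String) (num_spaces : Int) (out : String) : Decidable (Spec_addindent_py s num_spaces out) := by unfold Spec_addindent_py; infer_instance

-- ===== CLAIM (what is proved, stated in full; the proofs are below) =====
def Claim_equal_addindent_py : Prop := ∀ (s : String) (num_spaces : Int), Dom_addindent_py s num_spaces → Spec_addindent_py s num_spaces (addindent_py s num_spaces)

-- ===== LEMMAS AND PROOFS =====

-- simple recursion computing Python's s.replace("\n", new)
def repNl (new : List Char) : List Char → List Char
  | [] => []
  | c :: t => if c = '\n' then new ++ repNl new t else c :: repNl new t

-- simple recursion computing splitOn.go's result (cur is the current line, reversed)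
def splitNl (cur : List Char) : List Char → List (List Char)
  | [] => [cur.reverse]
  | c :: t => if c = '\n' then cur.reverse :: splitNl [] t else splitNl (c :: cur) t

lemma replace_go_eq (new : List Char) :
    ∀ (fuel : Nat) (l acc : List Char), l.length ≤ fuel →
      PySem.Chars.replace.go ['\n'] new fuel l acc = acc.reverse ++ repNl new l := by
  intro fuel
  induction fuel with
  | zero =>
    intro l acc h
    have : l = [] := List.eq_nil_of_length_eq_zero (Nat.le_zero.mp h)
    subst this
    simp [PySem.Chars.replace.go, repNl]
  | succ n ih =>
    intro l acc h
    cases l with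
    | nil => simp [PySem.Chars.replace.go, repNl]
    | cons c t =>
      rw [PySem.Chars.replace.go]
      by_cases hc : c = '\n'
      · subst hc
        simp only [List.isPrefixOf, beq_self_eq_true, Bool.true_and, if_pos]
        rw [ih _ _ (by simpa using Nat.le_of_succ_le_succ h)]
        simp [repNl]
      · have hp : (['\n'].isPrefixOf (c :: t)) = false := by
          simp [List.isPrefixOf]; exact fun h => absurd h.symm hc
        simp only [hp, Bool.false_eq_true, if_neg, not_false_iff]
        rw [ih _ _ (by simpa using Nat.le_of_succ_le_succ h)]
        simp [repNl, hc]

lemma splitOn_go_eq :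
    ∀ (fuel : Nat) (l cur : List Char) (accl : List (List Char)), l.length < fuel →
      PySem.Chars.splitOn.go ['\n'] fuel l cur accl = accl.reverse ++ splitNl cur l := by
  intro fuel
  induction fuel with
  | zero => intro l cur accl h; omega
  | succ n ih =>
    intro l cur accl h
    cases l with
    | nil => simp [PySem.Chars.splitOn.go, splitNl]
    | cons c t =>
      rw [PySem.Chars.splitOn.go]
      by_cases hc : c = '\n'
      · subst hc
        simp only [List.isPrefixOf, beq_self_eq_true, Bool.true_and, if_pos]
        rw [ih _ _ _ (by simpa using Nat.lt_of_succ_lt_succ h)]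
        simp [splitNl]
      · have hp : (['\n'].isPrefixOf (c :: t)) = false := by
          simp [List.isPrefixOf]; exact fun h => absurd h.symm hc
        simp only [hp, Bool.false_eq_true, if_neg, not_false_iff]
        rw [ih _ _ _ (by simpa using Nat.lt_of_succ_lt_succ h)]
        simp [splitNl, hc]

lemma splitNl_ne_nil (cur l : List Char) : splitNl cur l ≠ [] := by
  induction l generalizing cur with
  | nil => simp [splitNl]
  | cons c t ih => simp only [splitNl]; split_ifs <;> simp [ih]

-- the single substitution equals joining the split lines with the composite separator
lemma rep_eq_join (new : List Char) :
    ∀ (l cur : List Char), cur.reverse ++ repNl new l = PySem.Chars.join new (splitNl cur l) := by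
  intro l
  induction l with
  | nil => intro cur; simp [repNl, splitNl, PySem.Chars.join, List.intercalate]
  | cons c t ih =>
    intro cur
    by_cases hc : c = '\n'
    · subst hc
      simp only [repNl, splitNl, if_pos]
      cases hq : splitNl [] t with
      | nil => exact absurd hq (splitNl_ne_nil _ _)
      | cons a b =>
        rw [PySem.Chars.join_cons_cons]
        have := ih ([] : List Char)
        rw [hq] at this
        simp only [List.reverse_nil, List.nil_append] at this
        rw [← this]
        simp
    · simp only [repNl, splitNl, if_neg hc]
      have := ih (c :: cur)
      simpa using this

lemma splitNl_no_nl (cur : List Char) :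
    ∀ l, '\n' ∉ l → splitNl cur l = [cur.reverse ++ l] := by
  intro l
  induction l generalizing cur with
  | nil => simp [splitNl]
  | cons c t ih =>
    intro h
    simp only [List.mem_cons, not_or] at h
    simp [splitNl, Ne.symm h.1, ih _ h.2]

lemma splitNl_mem_nl (cur : List Char) :
    ∀ l, '\n' ∈ l → 2 ≤ (splitNl cur l).length := by
  intro l
  induction l generalizing cur with
  | nil => simp
  | cons c t ih =>
    intro h
    by_cases hc : c = '\n'
    · subst hc
      simp only [splitNl, if_pos, List.length_cons]
      cases hq : splitNl [] t with
      | nil => exact absurd hq (splitNl_ne_nil _ _)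
      | cons a b => simp
    · have ht : '\n' ∈ t := by
        rcases List.mem_cons.mp h with h1 | h1
        · exact absurd h1.symm hc
        · exact h1
      simpa [splitNl, hc] using ih (c :: cur) ht

-- A's tail shape (first + "\n" + "\n".join(indented rest)) equals a join with the composite separator
lemma join_sep_eq (ind first : List Char) :
    ∀ (rest : List (List Char)), rest ≠ [] →
      PySem.Chars.join ('\n' :: ind) (first :: rest)
        = first ++ '\n' :: PySem.Chars.join ['\n'] (rest.map (fun line => ind ++ line)) := by
  intro rest
  induction rest generalizing first with
  | nil => intro h; exact absurd rfl h
  | cons q r ih =>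
    intro _
    cases r with
    | nil => simp [PySem.Chars.join_cons_cons, PySem.Chars.join_singleton]
    | cons r2 rs =>
      rw [PySem.Chars.join_cons_cons, ih q (by simp)]
      conv_rhs => rw [List.map_cons, List.map_cons, PySem.Chars.join_cons_cons]
      simp

lemma splitOn_eq_splitNl (l : List Char) :
    PySem.Chars.splitOn l ['\n'] = splitNl [] l := by
  rw [PySem.Chars.splitOn, splitOn_go_eq _ _ _ _ (by omega)]
  simp

lemma replace_eq_repNl (l new : List Char) :
    PySem.Chars.replace l ['\n'] new = repNl new l := by
  rw [PySem.Chars.replace]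
  simp only [List.isEmpty_cons, Bool.false_eq_true, if_neg, not_false_iff]
  rw [replace_go_eq _ _ _ _ (le_refl _)]
  simp

-- ===== VERDICT (by name: the statement is the Claim_ definition above) =====
theorem addindent_py_spec : Claim_equal_addindent_py := by
  intro s num_spaces _
  unfold Spec_addindent_py addindent_py addindent_py_alt
  rw [splitOn_eq_splitNl]
  by_cases hnl : '\n' ∈ s.toList
  · have hin : PySem.Chars.isIn ['\n'] s.toList = true :=
      (PySem.Chars.isIn_iff_infix _ _).mpr ((List.singleton_infix_iff '\n' s.toList).mpr hnl)
    rw [if_pos hin, replace_eq_repNl]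
    have h2 := splitNl_mem_nl [] s.toList hnl
    cases hq : splitNl [] s.toList with
    | nil => exact absurd hq (splitNl_ne_nil _ _)
    | cons first rest =>
      rw [hq] at h2
      have hrest : rest ≠ [] := by
        cases rest with
        | nil => simp at h2
        | cons a b => simp
      have hlen : ((first :: rest).length == 1) = false := by
        simp at h2 ⊢
        omega
      simp only [hq, hlen, Bool.false_eq_true, if_neg, not_false_iff,
        PySem.List.pop?_zero_cons]
      have := rep_eq_join ('\n' :: pySpaces num_spaces) s.toList []
      rw [hq] at this
      simp only [List.reverse_nil, List.nil_append] at this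
      rw [this, join_sep_eq _ _ _ hrest]
  · have hin : PySem.Chars.isIn ['\n'] s.toList = false :=
      (PySem.Chars.isIn_eq_false_iff _ _).mpr (fun h => hnl ((List.singleton_infix_iff '\n' s.toList).mp h))
    rw [splitNl_no_nl [] s.toList hnl]
    simp [hin]
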